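-- pv_equiv track=rewrite | github.com/watovl/ReadMuller-and-Hamming-codes | ReadMuller and  Hamming code/HammingCode.py | createGenerSysMatrixHamming
-- ===== SOURCE A (Python) =====
-- def createGenerSysMatrixHamming(checkSysMatrix):
--     r = len(checkSysMatrix)
--     n = len(checkSysMatrix[0])
--     result = [[0]*n for i in range(n - r)]
--     # создание единичной подматрицы
--     for i in range(n - r):
--         result[i][i] = 1
--     # создание информационной подматрицы P
--     for i in range(r):
--         for j in range(n - r):
--             result[j][i + n - r] = checkSysMatrix[i][j]
--     return result
-- ===== SOURCE B (Python) =====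
-- def createGenerSysMatrixHamming(checkSysMatrix):
--     r = len(checkSysMatrix)
--     n = len(checkSysMatrix[0])
--     k = max(n - r, 0)
--     # build the generator matrix BY COLUMNS: k unit columns, then each check row
--     # truncated to length k is one parity column; a single transpose yields the rows
--     cols = [[int(i == j) for i in range(k)] for j in range(k)]
--     cols += [row[:k] for row in checkSysMatrix]
--     return [list(t) for t in zip(*cols)]
-- ===== Notes on version B (the rewrite author's own statement) =====
-- stated objective: alternative
-- what changed: B constructs the generator matrix column-by-column (k unit columns followed by each check row truncated to k as a parity column) and produces the rows with a single final transpose zip(*cols), instead of A's preallocated zero matrix mutated entry-by-entry by two index-write loops.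
import Mathlib
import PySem

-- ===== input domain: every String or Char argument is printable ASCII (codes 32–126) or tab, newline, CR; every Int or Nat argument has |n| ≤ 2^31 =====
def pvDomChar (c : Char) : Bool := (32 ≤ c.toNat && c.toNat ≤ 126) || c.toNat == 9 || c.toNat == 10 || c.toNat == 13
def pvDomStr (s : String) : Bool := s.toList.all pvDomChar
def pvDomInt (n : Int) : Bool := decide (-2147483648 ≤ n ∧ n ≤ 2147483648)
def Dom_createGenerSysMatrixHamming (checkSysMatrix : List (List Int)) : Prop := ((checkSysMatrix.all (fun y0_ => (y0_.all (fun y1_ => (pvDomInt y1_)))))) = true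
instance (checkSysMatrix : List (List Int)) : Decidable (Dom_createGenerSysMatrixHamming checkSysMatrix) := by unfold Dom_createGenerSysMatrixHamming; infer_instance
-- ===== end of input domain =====

-- B builds the matrix by COLUMNS (unit columns, then truncated check rows as parity columns)
-- and transposes once with zip(*cols), instead of mutating a preallocated zero matrix
-- entry-by-entry; objective: alternative decomposition, same cost.

-- ===== PORT A =====
-- literal transliteration of A: preallocate zero matrix, set the diagonal, then write the
-- transposed check entries column by column (list mutation `result[j][c] = v` = List.set).
def createGenerSysMatrixHamming (checkSysMatrix : List (List Int)) : List (List Int) :=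
  let r := checkSysMatrix.length
  let n := checkSysMatrix.headI.length
  let k := n - r
  let result := List.replicate k (List.replicate n (0 : Int))
  let result := (List.range k).foldl
    (fun acc i => acc.set i ((acc.getD i []).set i 1)) result
  let result := (List.range r).foldl
    (fun acc i => (List.range k).foldl
      (fun acc2 j => acc2.set j ((acc2.getD j []).set (i + k) ((checkSysMatrix.getD i []).getD j 0))) acc) result
  result

-- ===== PORT B =====
-- B-side helper: Python's [list(t) for t in zip(*cols)] (truncates to the shortest column).
def pyZipStar (cols : List (List Int)) : List (List Int) :=
  (List.range (((cols.map List.length).min?).getD 0)).map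
    (fun i => cols.map (fun c => c.getD i 0))

-- k = max(n - r, 0) is Nat subtraction; row[:k] with k ≥ 0 is List.take.
def createGenerSysMatrixHamming_alt (checkSysMatrix : List (List Int)) : List (List Int) :=
  let r := checkSysMatrix.length
  let n := checkSysMatrix.headI.length
  let k := n - r
  let cols := (List.range k).map
      (fun j => (List.range k).map (fun i => if i = j then (1 : Int) else 0))
    ++ checkSysMatrix.map (fun row => row.take k)
  pyZipStar cols

-- ===== PRECONDITION & SPEC =====
-- Pre_ excludes exactly the inputs where Python A raises IndexError: the empty matrix
-- (checkSysMatrix[0]) and matrices with a row shorter than n - r (checkSysMatrix[i][j]).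
def Pre_createGenerSysMatrixHamming (checkSysMatrix : List (List Int)) : Prop :=
  checkSysMatrix ≠ [] ∧
    ∀ row ∈ checkSysMatrix,
      checkSysMatrix.headI.length - checkSysMatrix.length ≤ row.length
instance (checkSysMatrix : List (List Int)) : Decidable (Pre_createGenerSysMatrixHamming checkSysMatrix) := by
  unfold Pre_createGenerSysMatrixHamming; infer_instance

def pvWitness_createGenerSysMatrixHamming : List (List Int) := [[1, 0, 1], [0, 1, 1]]

def Spec_createGenerSysMatrixHamming (checkSysMatrix : List (List Int)) (out : List (List Int)) : Prop := out = createGenerSysMatrixHamming_alt checkSysMatrix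
instance (checkSysMatrix : List (List Int)) (out : List (List Int)) : Decidable (Spec_createGenerSysMatrixHamming checkSysMatrix out) := by unfold Spec_createGenerSysMatrixHamming; infer_instance

-- ===== CLAIM (what is proved, stated in full; the proofs are below) =====
def Claim_equal_createGenerSysMatrixHamming : Prop := ∀ (checkSysMatrix : List (List Int)), Dom_createGenerSysMatrixHamming checkSysMatrix → Pre_createGenerSysMatrixHamming checkSysMatrix → Spec_createGenerSysMatrixHamming checkSysMatrix (createGenerSysMatrixHamming checkSysMatrix)

-- ===== LEMMAS AND PROOFS =====

theorem pv_set_append_len {α : Type} (pre rest : List α) (x v : α) :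
    (pre ++ x :: rest).set pre.length v = pre ++ v :: rest := by
  induction pre with
  | nil => simp
  | cons a pre ih => simp [ih]

theorem pv_getD_append_len {α : Type} (pre rest : List α) (x d : α) :
    (pre ++ x :: rest).getD pre.length d = x := by
  simp [List.getD_eq_getElem?_getD]

-- "for i in range(s, s+m): acc[i] = g(i, acc[i])" over the suffix rest of pre ++ rest
theorem pv_foldl_set_aux {α : Type} (g : Nat → α → α) (d : α) :
    ∀ (rest pre : List α),
      (List.range' pre.length rest.length).foldl
          (fun acc i => acc.set i (g i (acc.getD i d))) (pre ++ rest)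
        = pre ++ rest.mapIdx (fun j x => g (pre.length + j) x) := by
  intro rest
  induction rest with
  | nil => intro pre; simp
  | cons x rest ih =>
    intro pre
    rw [List.length_cons, List.range'_succ, List.foldl_cons,
        pv_getD_append_len, pv_set_append_len]
    have h1 : pre ++ g pre.length x :: rest = (pre ++ [g pre.length x]) ++ rest := by simp
    have h2 : pre.length + 1 = (pre ++ [g pre.length x]).length := by simp
    rw [h1, h2, ih (pre ++ [g pre.length x])]
    simp [List.mapIdx_cons, Nat.add_assoc, Nat.add_comm 1]

theorem pv_foldl_set_range {α : Type} (g : Nat → α → α) (d : α) (l : List α)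
    (m : Nat) (h : l.length = m) :
    (List.range m).foldl (fun acc i => acc.set i (g i (acc.getD i d))) l
      = l.mapIdx g := by
  subst h
  have := pv_foldl_set_aux g d l []
  simpa [List.range_eq_range'] using this

theorem pv_mapIdx_mapIdx {α : Type} (f g : Nat → α → α) (l : List α) :
    (l.mapIdx f).mapIdx g = l.mapIdx (fun i x => g i (f i x)) := by
  apply List.ext_getElem <;> simp [List.getElem_mapIdx]

-- the outer loop of A: each pass rewrites every row independently
theorem pv_outer_fold (k : Nat) (v : Nat → Nat → Int) :
    ∀ (L : List Nat) (res : List (List Int)), res.length = k →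
      L.foldl (fun acc i => (List.range k).foldl
          (fun acc2 j => acc2.set j ((acc2.getD j []).set (i + k) (v i j))) acc) res
        = res.mapIdx (fun j row => L.foldl (fun row i => row.set (i + k) (v i j)) row) := by
  intro L
  induction L with
  | nil =>
    intro res _
    apply List.ext_getElem <;> simp [List.getElem_mapIdx]
  | cons i L ih =>
    intro res hres
    rw [List.foldl_cons,
        pv_foldl_set_range (fun j row => row.set (i + k) (v i j)) [] res k hres,
        ih _ (by simp [hres]), pv_mapIdx_mapIdx]
    simp only [List.foldl_cons]

-- one row of A's result, written as identity-part ++ transposed column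
theorem pv_row (cs : List (List Int)) (n k j : Nat) (hkn : k ≤ n)
    (hnk : n - k = cs.length) :
    (List.range cs.length).foldl
        (fun row i => row.set (i + k) ((cs.getD i []).getD j 0))
        ((List.replicate n (0 : Int)).set j 1)
      = (List.range k).map (fun t => if t = j then (1 : Int) else 0)
          ++ cs.map (fun row => row.getD j 0) := by
  set base : List Int := (List.replicate n (0 : Int)).set j 1 with hbase
  have hblen : base.length = n := by simp [hbase]
  have hsplit : base = base.take k ++ base.drop k := (List.take_append_drop k base).symm
  have htlen : (base.take k).length = k := by simp [hblen, Nat.min_eq_left hkn]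
  have hdlen : (base.drop k).length = cs.length := by simp [hblen, hnk]
  have hmap : List.range' k cs.length = (List.range cs.length).map (fun i => k + i) :=
    List.range'_eq_map_range
  have key := pv_foldl_set_aux (fun p (_ : Int) => (cs.getD (p - k) []).getD j 0) 0
      (base.drop k) (base.take k)
  rw [htlen, hdlen, hmap, List.foldl_map] at key
  have hfn : (fun (row : List Int) (i : Nat) => row.set (i + k) ((cs.getD i []).getD j 0))
      = (fun (acc : List Int) (i : Nat) => acc.set (k + i) ((cs.getD (k + i - k) []).getD j 0)) := by
    funext row i
    rw [Nat.add_sub_cancel_left, Nat.add_comm]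
  have key' : (List.range cs.length).foldl
      (fun row i => row.set (i + k) ((cs.getD i []).getD j 0)) base
      = base.take k
          ++ (base.drop k).mapIdx (fun j1 _ => (cs.getD (k + j1 - k) []).getD j 0) := by
    conv_lhs => rw [hsplit]
    rw [hfn]
    exact key
  have hid : base.take k = (List.range k).map (fun t => if t = j then (1 : Int) else 0) := by
    apply List.ext_getElem
    · simp [htlen]
    · intro t h1 h2
      have ht : t < k := by simpa [htlen] using h1
      simp [hbase, List.getElem_take, List.getElem_set]
      split_ifs with h h' h'
      · rfl
      · exact absurd h.symm h'
      · exact absurd h'.symm h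
      · rfl
  have hcol : (base.drop k).mapIdx (fun j1 _ => (cs.getD (k + j1 - k) []).getD j 0)
      = cs.map (fun row => row.getD j 0) := by
    apply List.ext_getElem
    · simp [hdlen]
    · intro t h1 h2
      have ht : t < cs.length := by simpa using h2
      simp [List.getElem_mapIdx, List.getD_eq_getElem?_getD, List.getElem?_eq_getElem ht]
  rw [key', hid, hcol]

-- A's two write loops produce the canonical row list (identity part ++ j-th check column)
theorem pv_core_A (cs : List (List Int)) (n k : Nat)
    (hkn : k ≤ n) (hnk : n - k = cs.length) :
    (List.range cs.length).foldl
        (fun acc i => (List.range k).foldl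
          (fun acc2 j => acc2.set j ((acc2.getD j []).set (i + k) ((cs.getD i []).getD j 0))) acc)
        ((List.range k).foldl (fun acc i => acc.set i ((acc.getD i []).set i 1))
          (List.replicate k (List.replicate n (0 : Int))))
      = (List.range k).map
          (fun j => ((List.range k).map (fun t => if t = j then (1 : Int) else 0))
            ++ cs.map (fun row => row.getD j 0)) := by
  rw [pv_foldl_set_range (fun i row => row.set i 1) []
        (List.replicate k (List.replicate n (0 : Int))) k (by simp),
      pv_outer_fold k (fun i j => (cs.getD i []).getD j 0) (List.range cs.length) _ (by simp),
      pv_mapIdx_mapIdx]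
  apply List.ext_getElem
  · simp
  · intro j h1 h2
    have hjk : j < k := by simpa using h2
    rw [List.getElem_mapIdx]
    simp only [List.getElem_replicate]
    rw [List.getElem_map, List.getElem_range]
    exact pv_row cs n k j hkn hnk

-- the minimum of a nonempty constant list
theorem pv_min_replicate (m k : Nat) :
    ((List.replicate (m + 1) k).min?).getD 0 = k := by
  induction m with
  | zero => simp
  | succ m ih =>
    rw [List.replicate_succ] at *
    cases m with
    | zero => simp
    | succ m' =>
      rw [List.replicate_succ, List.min?_cons, List.min?_cons] at *
      simp at ih; simpa using ih

-- the column lengths in B are all k under Pre_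
theorem pv_cols_len (cs : List (List Int)) (k : Nat)
    (h : ∀ row ∈ cs, k ≤ row.length) :
    (((List.range k).map
        (fun j => (List.range k).map (fun i => if i = j then (1 : Int) else 0))
      ++ cs.map (fun row => row.take k)).map List.length)
      = List.replicate (k + cs.length) k := by
  rw [List.map_append, List.map_map, List.map_map, List.replicate_add]
  congr 1
  · apply List.ext_getElem <;> simp
  · apply List.ext_getElem
    · simp
    · intro i h1 h2
      have hi : i < cs.length := by simpa using h1
      simp only [List.getElem_map, Function.comp, List.length_take, List.getElem_replicate]
      exact Nat.min_eq_left (h cs[i] (List.getElem_mem hi))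

-- B produces the same canonical row list under Pre_
theorem pv_core_B (cs : List (List Int)) (k : Nat) (hne : cs ≠ [])
    (h : ∀ row ∈ cs, k ≤ row.length) :
    pyZipStar ((List.range k).map
        (fun j => (List.range k).map (fun i => if i = j then (1 : Int) else 0))
      ++ cs.map (fun row => row.take k))
      = (List.range k).map
          (fun j => ((List.range k).map (fun t => if t = j then (1 : Int) else 0))
            ++ cs.map (fun row => row.getD j 0)) := by
  unfold pyZipStar
  rw [pv_cols_len cs k h]
  obtain ⟨c, cs', rfl⟩ : ∃ c cs', cs = c :: cs' := by
    cases cs with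
    | nil => exact absurd rfl hne
    | cons c cs' => exact ⟨c, cs', rfl⟩
  have hrep : k + (c :: cs').length = (k + cs'.length) + 1 := by simp; omega
  rw [hrep, pv_min_replicate]
  apply List.ext_getElem
  · simp
  · intro i h1 h2
    have hik : i < k := by simpa using h1
    rw [List.getElem_map, List.getElem_range, List.getElem_map, List.getElem_range,
        List.map_append, List.map_map, List.map_map]
    congr 1
    · apply List.ext_getElem
      · simp
      · intro j hj1 hj2
        have hjk : j < k := by simpa using hj1
        simp only [List.getElem_map, Function.comp, List.getElem_range,
          List.getD_eq_getElem?_getD]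
        rw [List.getElem?_map]
        simp only [List.getElem?_range, hik]
        simp [eq_comm]
    · apply List.ext_getElem
      · simp
      · intro j hj1 hj2
        have hjl : j < (c :: cs').length := by simpa using hj1
        simp only [List.getElem_map, Function.comp, List.getD_eq_getElem?_getD]
        have hk : k ≤ ((c :: cs')[j]).length := h _ (List.getElem_mem hjl)
        rw [List.getElem?_take_of_lt hik]

theorem createGenerSysMatrixHamming_eq (cs : List (List Int))
    (hpre : Pre_createGenerSysMatrixHamming cs) :
    createGenerSysMatrixHamming cs = createGenerSysMatrixHamming_alt cs := by
  obtain ⟨hne, hrows⟩ := hpre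
  simp only [createGenerSysMatrixHamming, createGenerSysMatrixHamming_alt]
  have hkn : cs.headI.length - cs.length ≤ cs.headI.length := Nat.sub_le _ _
  by_cases hk0 : cs.headI.length - cs.length = 0
  · rw [hk0]
    rw [pv_core_B cs 0 hne (fun row _ => Nat.zero_le _)]
    simp
  · have hnk : cs.headI.length - (cs.headI.length - cs.length) = cs.length := by omega
    rw [pv_core_A cs cs.headI.length (cs.headI.length - cs.length) hkn hnk,
        pv_core_B cs (cs.headI.length - cs.length) hne hrows]

-- ===== VERDICT (by name: the statement is the Claim_ definition above) =====
theorem createGenerSysMatrixHamming_spec : Claim_equal_createGenerSysMatrixHamming := by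
  intro cs _ hpre
  exact createGenerSysMatrixHamming_eq cs hpre
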